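-- pv_equiv track=rewrite | github.com/noway/labels-nanogpt | toker.py | split_to_digits
-- ===== SOURCE A (Python) =====
-- def split_to_digits(s):
--     result = []
--     current_segment = ''
--     for char in s:
--         if char.isdigit():
--             if current_segment:
--                 result.append(current_segment)
--                 current_segment = ''
--             result.append(char)
--         else:
--             current_segment += char
--     if current_segment:
--         result.append(current_segment)
--     return result
-- ===== SOURCE B (Python) =====
-- def split_to_digits(s):
--     result = []
--     i, n = 0, len(s)
--     while i < n:
--         d = s[i].isdigit()
--         j = i + 1
--         while j < n and s[j].isdigit() == d:
--             j += 1
--         if d: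
--             result.extend(s[i:j])
--         else:
--             result.append(s[i:j])
--         i = j
--     return result
-- ===== Notes on version B (the rewrite author's own statement) =====
-- stated objective: alternative
-- what changed: B scans the string by maximal same-class runs (two-index span scanning, emitting each digit run character-wise and each non-digit run as one slice) instead of A's per-character loop with a current_segment accumulator.
import Mathlib
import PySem

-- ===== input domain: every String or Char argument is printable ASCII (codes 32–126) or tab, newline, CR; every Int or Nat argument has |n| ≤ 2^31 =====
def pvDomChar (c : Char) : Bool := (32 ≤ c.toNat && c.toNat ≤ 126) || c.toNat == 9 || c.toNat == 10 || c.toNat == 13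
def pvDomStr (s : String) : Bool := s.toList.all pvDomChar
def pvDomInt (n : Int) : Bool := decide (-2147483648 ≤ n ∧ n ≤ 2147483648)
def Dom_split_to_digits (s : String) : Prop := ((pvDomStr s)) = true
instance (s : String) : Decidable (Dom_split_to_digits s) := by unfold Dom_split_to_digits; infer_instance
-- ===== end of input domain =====

-- B replaces A's per-character loop with a current_segment accumulator by run-based
-- scanning (maximal same-class spans); alternative structure, same O(n) cost.


-- ===== PORT A =====
-- one loop step: state = (result, current_segment as List Char)
def pvStepA (p : List String × List Char) (c : Char) : List String × List Char :=
  if PySem.Chars.isdigit c then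
    ((if p.2.isEmpty then p.1 else p.1 ++ [String.ofList p.2]) ++ [String.ofList [c]], [])
  else (p.1, p.2 ++ [c])

def split_to_digits (s : String) : List String :=
  let r := s.toList.foldl pvStepA ([], [])
  if r.2.isEmpty then r.1 else r.1 ++ [String.ofList r.2]

-- ===== PORT B =====
-- run-based scan: take the maximal run with the same isdigit class as the head,
-- emit it (char-wise for digits, as one string otherwise), recurse on the rest.
def pvAltGo : List Char → List String
  | [] => []
  | c :: cs =>
    let d := PySem.Chars.isdigit c
    let run := cs.takeWhile (fun x => PySem.Chars.isdigit x == d)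
    let rest := cs.dropWhile (fun x => PySem.Chars.isdigit x == d)
    (if d then (c :: run).map (fun x => String.ofList [x]) else [String.ofList (c :: run)])
      ++ pvAltGo rest
termination_by l => l.length
decreasing_by
  simpa using Nat.lt_succ_of_le (List.length_dropWhile_le _ _)

def split_to_digits_alt (s : String) : List String := pvAltGo s.toList

-- ===== PRECONDITION & SPEC =====
def Spec_split_to_digits (s : String) (out : List String) : Prop := out = split_to_digits_alt s
instance (s : String) (out : List String) : Decidable (Spec_split_to_digits s out) := by unfold Spec_split_to_digits; infer_instance

-- ===== CLAIM (what is proved, stated in full; the proofs are below) =====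
def Claim_equal_split_to_digits : Prop := ∀ (s : String), Dom_split_to_digits s → Spec_split_to_digits s (split_to_digits s)

-- ===== LEMMAS AND PROOFS =====

-- common characterisation: core cur l = output of the rest of A's loop, pending segment cur
def pvCore : List Char → List Char → List String
  | cur, [] => if cur.isEmpty then [] else [String.ofList cur]
  | cur, c :: cs =>
    if PySem.Chars.isdigit c then
      (if cur.isEmpty then [] else [String.ofList cur]) ++ String.ofList [c] :: pvCore [] cs
    else pvCore (cur ++ [c]) cs

theorem pvA_core (l : List Char) : ∀ (res : List String) (cur : List Char),
    (let r := l.foldl pvStepA (res, cur);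
     if r.2.isEmpty then r.1 else r.1 ++ [String.ofList r.2]) = res ++ pvCore cur l := by
  induction l with
  | nil => intro res cur; simp [pvCore]; split <;> simp
  | cons c cs ih =>
    intro res cur
    simp only [List.foldl_cons]
    by_cases h : PySem.Chars.isdigit c
    · have hs : pvStepA (res, cur) c
          = ((if cur.isEmpty then res else res ++ [String.ofList cur]) ++ [String.ofList [c]], []) := by
        simp [pvStepA, h]
      rw [hs, ih, pvCore]
      simp only [h, if_true]
      split <;> simp
    · have hs : pvStepA (res, cur) c = (res, cur ++ [c]) := by
        simp [pvStepA, h]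
      rw [hs, ih, pvCore]
      simp [h]

theorem pvCore_nondigit_run : ∀ (run : List Char) (cur rest : List Char),
    (∀ x ∈ run, PySem.Chars.isdigit x = false) →
    pvCore cur (run ++ rest) = pvCore (cur ++ run) rest := by
  intro run
  induction run with
  | nil => simp
  | cons c cs ih =>
    intro cur rest h
    have hc : PySem.Chars.isdigit c = false := h c (by simp)
    simp only [List.cons_append, pvCore, hc, Bool.false_eq_true, if_false]
    rw [ih (cur ++ [c]) rest (fun x hx => h x (by simp [hx]))]
    simp

theorem pvCore_digit_run : ∀ (run : List Char) (rest : List Char),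
    (∀ x ∈ run, PySem.Chars.isdigit x = true) →
    pvCore [] (run ++ rest) = run.map (fun x => String.ofList [x]) ++ pvCore [] rest := by
  intro run
  induction run with
  | nil => simp
  | cons c cs ih =>
    intro rest h
    have hc : PySem.Chars.isdigit c = true := h c (by simp)
    simp only [List.cons_append, pvCore, hc, if_true, List.isEmpty_nil]
    rw [ih rest (fun x hx => h x (by simp [hx]))]
    simp

theorem pvCore_flush (cur : List Char) (rest : List Char)
    (hcur : ¬ cur.isEmpty)
    (hrest : ∀ c cs, rest = c :: cs → PySem.Chars.isdigit c = true) :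
    pvCore cur rest = String.ofList cur :: pvCore [] rest := by
  cases rest with
  | nil => simp [pvCore, hcur]
  | cons c cs =>
    have hc := hrest c cs rfl
    simp [pvCore, hc, hcur]

theorem pvAltGo_eq_core_fuel : ∀ (n : Nat) (l : List Char), l.length ≤ n → pvAltGo l = pvCore [] l := by
  intro n
  induction n with
  | zero =>
    intro l h
    have : l = [] := List.eq_nil_of_length_eq_zero (Nat.le_zero.1 h)
    subst this; simp [pvAltGo, pvCore]
  | succ n ih =>
    intro l h
    cases l with
    | nil => simp [pvAltGo, pvCore]
    | cons c cs =>
      simp only [pvAltGo]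
      set p := (fun x => PySem.Chars.isdigit x == PySem.Chars.isdigit c) with hp
      set run := cs.takeWhile p with hrun
      set rest := cs.dropWhile p with hrest
      have hsplit : run ++ rest = cs := List.takeWhile_append_dropWhile
      have hrestlen : rest.length ≤ n := by
        have h1 := List.length_dropWhile_le p cs
        rw [← hrest] at h1
        have : cs.length ≤ n := Nat.le_of_succ_le_succ (by simpa using h)
        omega
      have hih : pvAltGo rest = pvCore [] rest := ih rest hrestlen
      have hhead : ∀ c' cs', rest = c' :: cs' → PySem.Chars.isdigit c' ≠ PySem.Chars.isdigit c := by
        intro c' cs' hr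
        have h2 := List.head?_dropWhile_not p cs
        rw [← hrest, hr] at h2
        simp only [List.head?_cons] at h2
        simpa [hp] using h2
      by_cases hd : PySem.Chars.isdigit c
      · have hrunall : ∀ x ∈ run, PySem.Chars.isdigit x = true := by
          intro x hx
          have := List.mem_takeWhile_imp (hrun ▸ hx)
          simpa [hp, hd] using this
        rw [if_pos hd, hih]
        conv_rhs => rw [← hsplit]
        show (c :: run).map (fun x => String.ofList [x]) ++ pvCore [] rest
            = pvCore [] (c :: (run ++ rest))
        rw [show pvCore [] (c :: (run ++ rest))
            = String.ofList [c] :: pvCore [] (run ++ rest) by simp [pvCore, hd]]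
        rw [pvCore_digit_run run rest hrunall]
        simp
      · have hrunall : ∀ x ∈ run, PySem.Chars.isdigit x = false := by
          intro x hx
          have := List.mem_takeWhile_imp (hrun ▸ hx)
          simp only [hp, beq_iff_eq] at this
          simpa [this] using hd
        rw [if_neg hd, hih]
        conv_rhs => rw [← hsplit]
        show [String.ofList (c :: run)] ++ pvCore [] rest = pvCore [] (c :: (run ++ rest))
        rw [show pvCore [] (c :: (run ++ rest)) = pvCore [c] (run ++ rest) by
          simp [pvCore, hd]]
        rw [show pvCore [c] (run ++ rest) = pvCore ([c] ++ run) rest from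
          pvCore_nondigit_run run [c] rest hrunall]
        have hdf : PySem.Chars.isdigit c = false := by simpa using hd
        rw [show ([c] ++ run : List Char) = c :: run from rfl]
        rw [pvCore_flush (c :: run) rest (by simp) (by
          intro c' cs' hr
          have hne := hhead c' cs' hr
          cases hdc' : PySem.Chars.isdigit c' with
          | true => rfl
          | false => rw [hdc', hdf] at hne; exact absurd rfl hne)]
        simp

theorem pvAltGo_eq_core (l : List Char) : pvAltGo l = pvCore [] l :=
  pvAltGo_eq_core_fuel l.length l (Nat.le_refl _)

-- ===== VERDICT (by name: the statement is the Claim_ definition above) =====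
theorem split_to_digits_spec : Claim_equal_split_to_digits := by
  intro s _
  unfold Spec_split_to_digits split_to_digits split_to_digits_alt
  rw [pvAltGo_eq_core]
  simpa using pvA_core s.toList [] []
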